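-- pv_equiv track=rewrite | github.com/bgoonz/UsefulResourceRepo2.0 | _Job-Search/InterviewPractice-master/InterviewPractice-master/Python/BlackandWhite.py | bwMoves
-- ===== SOURCE A (Python) =====
-- def bwMoves(start, target):
--
--     action = 0
--     counter = 0
--
--     for i in range(len(start)):
--         if start[i] == target[i]:
--             if counter != i:
--                 action += 1
--             counter +=1
--
--
--     return action
-- ===== SOURCE B (Python) =====
-- def bwMoves(start, target):
--     # total number of matching positions
--     total = sum(1 for i in range(len(start)) if start[i] == target[i])
--     # length of the leading run of consecutive matches
--     prefix = 0
--     for i in range(len(start)):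
--         if start[i] == target[i]:
--             prefix += 1
--         else:
--             break
--     return total - prefix
-- ===== Notes on version B (the rewrite author's own statement) =====
-- stated objective: alternative
-- what changed: Replaces A's single stateful loop (counter/action bookkeeping) with the closed decomposition: total matching positions minus the length of the leading run of consecutive matches, computed in two independent passes.
import Mathlib
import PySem

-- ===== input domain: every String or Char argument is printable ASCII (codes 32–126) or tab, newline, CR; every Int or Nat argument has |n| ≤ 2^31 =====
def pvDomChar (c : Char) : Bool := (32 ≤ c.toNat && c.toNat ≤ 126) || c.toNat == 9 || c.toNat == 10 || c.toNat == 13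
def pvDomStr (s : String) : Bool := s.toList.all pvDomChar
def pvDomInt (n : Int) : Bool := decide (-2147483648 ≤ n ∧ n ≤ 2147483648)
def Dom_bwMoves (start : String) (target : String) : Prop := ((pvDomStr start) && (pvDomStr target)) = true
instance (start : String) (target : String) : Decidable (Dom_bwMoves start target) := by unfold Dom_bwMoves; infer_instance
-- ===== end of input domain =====

-- B computes the same count as A by a different decomposition: total matches minus leading matching run.


-- ===== PORT A =====
-- A's loop over i in range(len(start)) reading start[i], target[i] with state (i, action, counter),
-- as the obvious structural recursion over both character lists (under Pre_ target is never exhausted first).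
def bwMovesGo : List Char → List Char → Int → Int → Int → Int
  | a :: as, b :: bs, i, action, counter =>
      if a = b then
        bwMovesGo as bs (i + 1) (if counter ≠ i then action + 1 else action) (counter + 1)
      else
        bwMovesGo as bs (i + 1) action counter
  | _, _, _, action, _ => action

def bwMoves (start : String) (target : String) : Int :=
  bwMovesGo start.toList target.toList 0 0 0

-- ===== PORT B =====
-- pass 1 of Source B: total = number of matching positions
def bwTotal : List Char → List Char → Int
  | a :: as, b :: bs => (if a = b then 1 else 0) + bwTotal as bs
  | _, _ => 0

-- pass 2 of Source B: leading run of consecutive matches, breaking at the first mismatch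
def bwPrefix : List Char → List Char → Int
  | a :: as, b :: bs => if a = b then 1 + bwPrefix as bs else 0
  | _, _ => 0

def bwMoves_alt (start : String) (target : String) : Int :=
  bwTotal start.toList target.toList - bwPrefix start.toList target.toList

-- ===== PRECONDITION & SPEC =====
-- Pre_ excludes exactly the inputs where Python A raises IndexError (target shorter than start).
def Pre_bwMoves (start : String) (target : String) : Prop :=
  start.toList.length ≤ target.toList.length
instance (start : String) (target : String) : Decidable (Pre_bwMoves start target) := by
  unfold Pre_bwMoves; infer_instance

def pvWitness_bwMoves : String × String := ("ab", "ab")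

def Spec_bwMoves (start : String) (target : String) (out : Int) : Prop := out = bwMoves_alt start target
instance (start : String) (target : String) (out : Int) : Decidable (Spec_bwMoves start target out) := by unfold Spec_bwMoves; infer_instance

-- ===== CLAIM (what is proved, stated in full; the proofs are below) =====
def Claim_equal_bwMoves : Prop := ∀ (start : String) (target : String), Dom_bwMoves start target → Pre_bwMoves start target → Spec_bwMoves start target (bwMoves start target)

-- ===== LEMMAS AND PROOFS =====
-- Invariant of A's loop: with counter ≤ i, the final action is
-- action + total matches − (leading run, but only while the run of perfect prefixes is alive, i.e. counter = i).
theorem bwMovesGo_eq (s t : List Char) :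
    ∀ (i action counter : Int), counter ≤ i →
      bwMovesGo s t i action counter =
        action + bwTotal s t - (if counter = i then bwPrefix s t else 0) := by
  induction s generalizing t with
  | nil => intro i action counter _; cases t <;> simp [bwMovesGo, bwTotal, bwPrefix]
  | cons a as ih =>
    intro i action counter hle
    cases t with
    | nil => simp [bwMovesGo, bwTotal, bwPrefix]
    | cons b bs =>
      by_cases hab : a = b
      · rw [bwMovesGo]
        simp only [hab, if_pos rfl]
        rw [ih bs (i + 1) _ (counter + 1) (by omega)]
        by_cases hc : counter = i
        · simp [bwTotal, bwPrefix, hc, hab]; ring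
        · have : ¬ (counter + 1 = i + 1) := by omega
          simp [bwTotal, bwPrefix, hc, hab, this]; ring
      · rw [bwMovesGo]
        simp only [hab, if_neg hab]
        rw [ih bs (i + 1) action counter (by omega)]
        have : ¬ (counter = i + 1) := by omega
        simp [bwTotal, bwPrefix, hab, this]

-- ===== VERDICT (by name: the statement is the Claim_ definition above) =====
theorem bwMoves_spec : Claim_equal_bwMoves := by
  intro start target _ _
  unfold Spec_bwMoves bwMoves bwMoves_alt
  rw [bwMovesGo_eq start.toList target.toList 0 0 0 le_rfl]
  simp
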